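-- pv_equiv track=rewrite | github.com/tempifyOS/steganography-project | find runs test func thing v4.py | find_runs_and_convert_to_output_string
-- ===== SOURCE A (Python) =====
-- def find_runs_and_convert_to_output_string(s: str, M: int) -> str:
--     """
--     Finds all non-overlapping runs of at least length M in the binary string s.
--     For each run:
--       - Appends '1' to the output if the run length is odd
--       - Appends '0' if the run length is even
--
--     Parameters:
--     - s (str): A string of '0's and '1's.
--     - M (int): The minimum run length.
--
--     Returns:
--     - str: A string of '0's and '1's representing parity of each qualifying run.
--     """
--     if M <= 0:
--         raise ValueError("Minimum length M must be greater than 0.")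
--
--     i = 0
--     n = len(s)
--     output = ""
--
--     while i < n:
--         run_char = s[i]
--         start = i
--         while i < n and s[i] == run_char:
--             i += 1
--         run_length = i - start
--         if run_length >= M:
--             output += '1' if run_length % 2 == 1 else '0'
--
--     return output
-- ===== SOURCE B (Python) =====
-- def find_runs_and_convert_to_output_string(s: str, M: int) -> str:
--     """Two-phase: collect run boundaries, then emit parity for each run of length >= M."""
--     if M <= 0:
--         raise ValueError("Minimum length M must be greater than 0.")
--     bounds = [0]
--     for i, (prev, cur) in enumerate(zip(s, s[1:])):
--         if cur != prev:
--             bounds.append(i + 1)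
--     bounds.append(len(s))
--     out = []
--     for a, b in zip(bounds, bounds[1:]):
--         length = b - a
--         if length >= M:
--             out.append('1' if length % 2 == 1 else '0')
--     return ''.join(out)
-- ===== Notes on version B (the rewrite author's own statement) =====
-- stated objective: alternative
-- what changed: Replaces the index-based while-loop that scans each run in place with a two-phase pass: first build the list of run-boundary indices by comparing adjacent characters, then emit the parity of each boundary difference >= M, joining a list at the end instead of repeated string concatenation.
-- outside the precondition, e.g. on find_runs_and_convert_to_output_string('0011', 0): A raises ValueError, B raises ValueError
import Mathlib
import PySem

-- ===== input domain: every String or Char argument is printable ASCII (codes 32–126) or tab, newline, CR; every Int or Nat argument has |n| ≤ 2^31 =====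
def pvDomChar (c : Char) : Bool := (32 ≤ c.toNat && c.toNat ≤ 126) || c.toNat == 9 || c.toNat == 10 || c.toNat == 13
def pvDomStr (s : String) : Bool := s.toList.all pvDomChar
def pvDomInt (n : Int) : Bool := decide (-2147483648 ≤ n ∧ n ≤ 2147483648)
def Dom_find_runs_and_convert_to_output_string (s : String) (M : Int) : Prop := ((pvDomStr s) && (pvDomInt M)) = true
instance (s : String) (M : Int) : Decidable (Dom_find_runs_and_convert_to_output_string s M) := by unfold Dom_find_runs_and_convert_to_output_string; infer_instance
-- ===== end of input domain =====

-- B replaces A's single index-driven while-loop with a two-phase pass (run-boundary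
-- list first, then parity of each boundary difference); equivalence proved for M ≥ 1
-- (A raises ValueError for M ≤ 0, excluded by Pre_).

-- ===== PORT A =====
-- inner `while i < n and s[i] == run_char: i += 1`: returns (number of leading chars equal
-- to run_char, remaining suffix) — the same state A keeps via the index i
def pvTakeRun (c : Char) : List Char → Nat × List Char
  | [] => (0, [])
  | x :: xs => if x = c then ((pvTakeRun c xs).1 + 1, (pvTakeRun c xs).2) else (0, x :: xs)

-- termination helper for the outer loop
theorem pvTakeRun_len (c : Char) (xs : List Char) :
    (pvTakeRun c xs).1 + (pvTakeRun c xs).2.length = xs.length := by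
  induction xs with
  | nil => simp [pvTakeRun]
  | cons x xs ih =>
    by_cases h : x = c
    · simp [pvTakeRun, h]; omega
    · simp [pvTakeRun, h]

-- outer `while i < n` loop of A, as structural recursion on the unscanned suffix
def pvALoop (M : Int) : List Char → List Char
  | [] => []
  | c :: xs =>
    let k := (pvTakeRun c xs).1
    let rest := (pvTakeRun c xs).2
    let run_length : Int := (k : Int) + 1
    (if run_length ≥ M then (if run_length % 2 == 1 then ['1'] else ['0']) else []) ++
      pvALoop M rest
termination_by l => l.length
decreasing_by
  have := pvTakeRun_len c xs
  simp only [List.length_cons]; omega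

def find_runs_and_convert_to_output_string (s : String) (M : Int) : String :=
  String.ofList (pvALoop M s.toList)

-- ===== PORT B =====
-- `for i, (prev, cur) in enumerate(zip(s, s[1:])): if cur != prev: bounds.append(i+1)`
def pvTrans : Nat → List Char → List Nat
  | i, x :: y :: rest => (if x ≠ y then [i + 1] else []) ++ pvTrans (i + 1) (y :: rest)
  | _, _ => []

-- bounds = [0] + transitions + [len(s)]
def pvBounds (l : List Char) : List Nat := 0 :: (pvTrans 0 l ++ [l.length])

-- `zip(bounds, bounds[1:])`
def pvPairs : List Nat → List (Nat × Nat)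
  | a :: b :: rest => (a, b) :: pvPairs (b :: rest)
  | _ => []

def find_runs_and_convert_to_output_string_alt (s : String) (M : Int) : String :=
  String.ofList ((pvPairs (pvBounds s.toList)).filterMap
    (fun p => if ((p.2 : Int) - (p.1 : Int)) ≥ M then
        some (if ((p.2 : Int) - (p.1 : Int)) % 2 == 1 then '1' else '0')
      else none))

-- ===== PRECONDITION & SPEC =====
-- A raises ValueError when M ≤ 0 (and B keeps the same guard); Pre_ excludes exactly those inputs.
def Pre_find_runs_and_convert_to_output_string (s : String) (M : Int) : Prop := 1 ≤ M
instance (s : String) (M : Int) : Decidable (Pre_find_runs_and_convert_to_output_string s M) := by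
  unfold Pre_find_runs_and_convert_to_output_string; infer_instance

def pvWitness_find_runs_and_convert_to_output_string : String × Int := ("0001101", 2)

def Spec_find_runs_and_convert_to_output_string (s : String) (M : Int) (out : String) : Prop := out = find_runs_and_convert_to_output_string_alt s M
instance (s : String) (M : Int) (out : String) : Decidable (Spec_find_runs_and_convert_to_output_string s M out) := by unfold Spec_find_runs_and_convert_to_output_string; infer_instance

-- ===== CLAIM (what is proved, stated in full; the proofs are below) =====
def Claim_equal_find_runs_and_convert_to_output_string : Prop := ∀ (s : String) (M : Int), Dom_find_runs_and_convert_to_output_string s M → Pre_find_runs_and_convert_to_output_string s M → Spec_find_runs_and_convert_to_output_string s M (find_runs_and_convert_to_output_string s M)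

-- ===== LEMMAS AND PROOFS =====

-- parity emitter shared by both characterisations
def pvH (M L : Int) : Option Char :=
  if L ≥ M then some (if L % 2 == 1 then '1' else '0') else none

-- the run lengths of l, in order
def pvRunLens : List Char → List Nat
  | [] => []
  | c :: xs => ((pvTakeRun c xs).1 + 1) :: pvRunLens (pvTakeRun c xs).2
termination_by l => l.length
decreasing_by
  have := pvTakeRun_len c xs
  simp only [List.length_cons]; omega

theorem pvALoop_eq (M : Int) :
    ∀ (n : Nat) (l : List Char), l.length ≤ n →
      pvALoop M l = (pvRunLens l).filterMap (fun k => pvH M (Int.ofNat k)) := by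
  intro n
  induction n with
  | zero =>
    intro l hl
    have : l = [] := List.eq_nil_of_length_eq_zero (Nat.le_zero.mp hl)
    subst this; simp [pvALoop, pvRunLens]
  | succ n ih =>
    intro l hl
    cases l with
    | nil => simp [pvALoop, pvRunLens]
    | cons c xs =>
      have hlen := pvTakeRun_len c xs
      have hrest : (pvTakeRun c xs).2.length ≤ n := by
        simp only [List.length_cons] at hl; omega
      rw [pvALoop, pvRunLens]
      simp only [List.filterMap_cons]
      rw [ih _ hrest]
      unfold pvH
      split_ifs <;> simp_all <;> omega

theorem pvTrans_run :
    ∀ (xs : List Char) (c : Char) (i : Nat),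
      pvTrans i (c :: xs) =
        (match (pvTakeRun c xs).2 with
          | [] => []
          | d :: r' => (i + (pvTakeRun c xs).1 + 1) ::
              pvTrans (i + (pvTakeRun c xs).1 + 1) (d :: r')) := by
  intro xs
  induction xs with
  | nil => intro c i; simp [pvTrans, pvTakeRun]
  | cons x xs' ih =>
    intro c i
    by_cases h : x = c
    · subst h
      have h1 : pvTrans i (x :: x :: xs') = pvTrans (i + 1) (x :: xs') := by
        simp [pvTrans]
      rw [h1, ih x (i + 1)]
      simp only [pvTakeRun]
      cases hr : (pvTakeRun x xs').2 with
      | nil => simp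
      | cons d r' =>
        have h2 : i + 1 + (pvTakeRun x xs').1 + 1 = i + ((pvTakeRun x xs').1 + 1) + 1 := by omega
        simp [h2]
    · have hne : c ≠ x := fun h' => h h'.symm
      simp [pvTrans, pvTakeRun, hne, h]

theorem pvDiffs_eq :
    ∀ (n : Nat) (l : List Char), l.length ≤ n → ∀ (i : Nat),
      (pvPairs (i :: (pvTrans i l ++ [i + l.length]))).map
          (fun p => ((p.2 : Int) - (p.1 : Int))) =
        (if l = [] then [0] else (pvRunLens l).map Int.ofNat) := by
  intro n
  induction n with
  | zero =>
    intro l hl i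
    have : l = [] := List.eq_nil_of_length_eq_zero (Nat.le_zero.mp hl)
    subst this; simp [pvTrans, pvPairs]
  | succ n ih =>
    intro l hl i
    cases l with
    | nil => simp [pvTrans, pvPairs]
    | cons c xs =>
      have hlen := pvTakeRun_len c xs
      rw [pvTrans_run xs c i]
      cases hr : (pvTakeRun c xs).2 with
      | nil =>
        have hk : (pvTakeRun c xs).1 = xs.length := by
          rw [hr] at hlen; simpa using hlen
        rw [pvRunLens, hr]
        simp [pvPairs, pvRunLens, hk]
      | cons d r' =>
        have hsplit : i + (c :: xs).length =
            (i + (pvTakeRun c xs).1 + 1) + (d :: r').length := by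
          have e1 := pvTakeRun_len c xs
          rw [hr] at e1
          simp only [List.length_cons] at e1 ⊢
          omega
        have hrlen : (d :: r').length ≤ n := by
          rw [hr] at hlen; simp only [List.length_cons] at hlen hl ⊢; omega
        rw [hsplit]
        have hIH := ih (d :: r') hrlen (i + (pvTakeRun c xs).1 + 1)
        simp only [List.cons_append, pvPairs, List.map_cons, hIH]
        have hRL : pvRunLens (c :: xs) = ((pvTakeRun c xs).1 + 1) :: pvRunLens (d :: r') := by
          rw [pvRunLens, hr]
        rw [if_neg (List.cons_ne_nil d r'), if_neg (List.cons_ne_nil c xs), hRL,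
          List.map_cons]
        congr 1
        simp only [Int.ofNat_eq_natCast]
        push_cast
        omega

theorem pvH_zero_of_pos {M : Int} (hM : 1 ≤ M) : pvH M 0 = none := by
  unfold pvH; rw [if_neg]; omega

-- ===== VERDICT (by name: the statement is the Claim_ definition above) =====
theorem find_runs_and_convert_to_output_string_spec : Claim_equal_find_runs_and_convert_to_output_string := by
  intro s M _ hM
  unfold Spec_find_runs_and_convert_to_output_string
  unfold find_runs_and_convert_to_output_string find_runs_and_convert_to_output_string_alt
  congr 1
  have hB : (pvPairs (pvBounds s.toList)).filterMap
      (fun p => if ((p.2 : Int) - (p.1 : Int)) ≥ M then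
          some (if ((p.2 : Int) - (p.1 : Int)) % 2 == 1 then '1' else '0')
        else none) =
      ((pvPairs (pvBounds s.toList)).map
        (fun p => ((p.2 : Int) - (p.1 : Int)))).filterMap (pvH M) := by
    rw [List.filterMap_map]; rfl
  rw [pvALoop_eq M s.toList.length s.toList le_rfl, hB]
  have hb : pvBounds s.toList = 0 :: (pvTrans 0 s.toList ++ [0 + s.toList.length]) := by
    simp [pvBounds]
  rw [hb, pvDiffs_eq s.toList.length s.toList le_rfl 0]
  by_cases hnil : s.toList = []
  · simp [hnil, pvRunLens, pvH_zero_of_pos hM]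
  · rw [if_neg hnil, List.filterMap_map]; rfl
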